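-- pv_equiv track=rewrite | github.com/adiuv0/gamevault | cli/gamevault_sync.py | _vdf_tokenize
-- ===== SOURCE A (Python) =====
-- def _vdf_tokenize(text: str) -> list[str]:
--     """Tokenize a Valve KeyValue string into a list of tokens.
--
--     Tokens are quoted strings (without the quotes), or the braces { }.
--     Whitespace is skipped.  ``//`` comments run to end-of-line.
--     Backslash escapes inside quoted strings are honoured.
--     """
--     tokens: list[str] = []
--     i = 0
--     length = len(text)
--     while i < length:
--         ch = text[i]
--
--         # Skip whitespace
--         if ch in (" ", "\t", "\r", "\n"):
--             i += 1
--             continue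
--
--         # Skip // line comments
--         if ch == "/" and i + 1 < length and text[i + 1] == "/":
--             i += 2
--             while i < length and text[i] != "\n":
--                 i += 1
--             continue
--
--         # Braces
--         if ch in ("{", "}"):
--             tokens.append(ch)
--             i += 1
--             continue
--
--         # Quoted string
--         if ch == '"':
--             i += 1  # skip opening quote
--             buf: list[str] = []
--             while i < length:
--                 c = text[i]
--                 if c == "\\":
--                     i += 1
--                     if i < length:
--                         esc = text[i]
--                         if esc == "n":
--                             buf.append("\n")
--                         elif esc == "t":
--                             buf.append("\t")
--                         elif esc == "\\":
--                             buf.append("\\")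
--                         elif esc == '"':
--                             buf.append('"')
--                         else:
--                             buf.append(esc)
--                         i += 1
--                     continue
--                 if c == '"':
--                     i += 1  # skip closing quote
--                     break
--                 buf.append(c)
--                 i += 1
--             tokens.append("".join(buf))
--             continue
--
--         # Unquoted token (up to whitespace or special char)
--         buf2: list[str] = []
--         while i < length and text[i] not in (" ", "\t", "\r", "\n", '"', "{", "}"):
--             buf2.append(text[i])
--             i += 1
--         if buf2:
--             tokens.append("".join(buf2))
--             continue
--
--         i += 1
--
--     return tokens
-- ===== SOURCE B (Python) =====
-- def _vdf_tokenize(text: str) -> list[str]: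
--     """Single-pass state-machine tokenizer for Valve KeyValue text."""
--     NORMAL, SLASH, COMMENT, QUOTE, ESCAPE, WORD = range(6)
--     tokens: list[str] = []
--     buf: list[str] = []
--     state = NORMAL
--     for ch in text:
--         if state == NORMAL:
--             if ch in " \t\r\n":
--                 pass
--             elif ch == "/":
--                 state = SLASH
--             elif ch in "{}":
--                 tokens.append(ch)
--             elif ch == '"':
--                 buf = []
--                 state = QUOTE
--             else:
--                 buf = [ch]
--                 state = WORD
--         elif state == SLASH:
--             if ch == "/":
--                 state = COMMENT
--             elif ch in " \t\r\n":
--                 tokens.append("/")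
--                 state = NORMAL
--             elif ch in "{}":
--                 tokens.append("/")
--                 tokens.append(ch)
--                 state = NORMAL
--             elif ch == '"':
--                 tokens.append("/")
--                 buf = []
--                 state = QUOTE
--             else:
--                 buf = ["/", ch]
--                 state = WORD
--         elif state == COMMENT:
--             if ch == "\n":
--                 state = NORMAL
--         elif state == QUOTE:
--             if ch == "\\":
--                 state = ESCAPE
--             elif ch == '"':
--                 tokens.append("".join(buf))
--                 state = NORMAL
--             else:
--                 buf.append(ch)
--         elif state == ESCAPE:
--             buf.append("\n" if ch == "n" else "\t" if ch == "t" else ch)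
--             state = QUOTE
--         else:  # WORD
--             if ch in " \t\r\n":
--                 tokens.append("".join(buf))
--                 state = NORMAL
--             elif ch == '"':
--                 tokens.append("".join(buf))
--                 buf = []
--                 state = QUOTE
--             elif ch in "{}":
--                 tokens.append("".join(buf))
--                 tokens.append(ch)
--                 state = NORMAL
--             else:
--                 buf.append(ch)
--     if state == SLASH:
--         tokens.append("/")
--     elif state in (QUOTE, ESCAPE, WORD):
--         tokens.append("".join(buf))
--     return tokens
-- ===== Notes on version B (the rewrite author's own statement) =====
-- stated objective: alternative
-- what changed: Replaced the index-juggling main loop with nested inner while-loops by a single pass that folds one six-state state machine (normal/slash/comment/quote/escape/word) over the characters.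
import Mathlib
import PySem

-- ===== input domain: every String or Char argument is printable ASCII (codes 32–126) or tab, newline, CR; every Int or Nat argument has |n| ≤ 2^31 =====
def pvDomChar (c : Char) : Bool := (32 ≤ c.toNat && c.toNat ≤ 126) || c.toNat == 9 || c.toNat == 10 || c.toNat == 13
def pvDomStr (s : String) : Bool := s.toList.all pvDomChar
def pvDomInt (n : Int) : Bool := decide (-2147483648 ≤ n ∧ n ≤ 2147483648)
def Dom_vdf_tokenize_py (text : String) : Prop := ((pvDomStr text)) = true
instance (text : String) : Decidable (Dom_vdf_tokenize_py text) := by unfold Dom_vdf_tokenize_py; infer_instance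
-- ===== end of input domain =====

-- B replaces A's index-juggling nested while loops by a single-pass six-state machine folded
-- over the characters (objective: alternative decomposition, same O(n) cost; return value only).

-- ===== PORT A =====
-- `ch in (" ", "\t", "\r", "\n")`
def pvIsWS (c : Char) : Bool := c = ' ' || c = '\t' || c = '\r' || c = '\n'
-- `text[i] in (" ", "\t", "\r", "\n", '"', "{", "}")` (stop set of the unquoted-token loop)
def pvIsSpecial (c : Char) : Bool := pvIsWS c || c = '"' || c = '{' || c = '}'

-- inner comment loop: `while i < length and text[i] != "\n": i += 1` (stops AT the newline)
def pvSkipComment : List Char → List Char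
  | [] => []
  | c :: rest => if c = '\n' then c :: rest else pvSkipComment rest

-- inner quoted-string loop of A; returns (buf, remaining text)
def pvScanQuoted : List Char → List Char → List Char × List Char
  | buf, [] => (buf, [])
  | buf, c :: rest =>
    if c = '\\' then
      match rest with
      | [] => (buf, [])   -- lone trailing backslash: skipped, loop then exits
      | e :: rest' =>
        let x := if e = 'n' then '\n' else if e = 't' then '\t'
                 else if e = '\\' then '\\' else if e = '"' then '"' else e
        pvScanQuoted (buf ++ [x]) rest'
    else if c = '"' then (buf, rest)   -- closing quote consumed
    else pvScanQuoted (buf ++ [c]) rest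

-- equation lemmas for pvScanQuoted (its nested match hides the default simp equations);
-- cited by pvScanQuoted_length, which vdfLoopA's termination proof needs
theorem pvScanQuoted_esc_nil (buf : List Char) : pvScanQuoted buf ['\\'] = (buf, []) := rfl
theorem pvScanQuoted_esc (buf : List Char) (e : Char) (r' : List Char) :
    pvScanQuoted buf ('\\' :: e :: r')
      = pvScanQuoted (buf ++ [if e = 'n' then '\n' else if e = 't' then '\t'
          else if e = '\\' then '\\' else if e = '"' then '"' else e]) r' := rfl
theorem pvScanQuoted_close (buf : List Char) (r : List Char) :
    pvScanQuoted buf ('"' :: r) = (buf, r) := by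
  rw [pvScanQuoted.eq_def]; rfl
theorem pvScanQuoted_other (buf : List Char) (c : Char) (r : List Char)
    (hb : c ≠ '\\') (hq : c ≠ '"') :
    pvScanQuoted buf (c :: r) = pvScanQuoted (buf ++ [c]) r := by
  rw [pvScanQuoted.eq_def]; simp only [if_neg hb, if_neg hq]

-- inner unquoted-token loop of A; returns (buf2, remaining text)
def pvScanWord : List Char → List Char → List Char × List Char
  | buf, [] => (buf, [])
  | buf, c :: rest => if pvIsSpecial c then (buf, c :: rest) else pvScanWord (buf ++ [c]) rest

theorem pvSkipComment_length : ∀ l : List Char, (pvSkipComment l).length ≤ l.length := by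
  intro l
  induction l with
  | nil => simp [pvSkipComment]
  | cons c r ih =>
    by_cases hc : c = '\n'
    · simp [pvSkipComment, hc]
    · simp only [pvSkipComment, if_neg hc, List.length_cons]; omega

theorem pvScanQuoted_length : ∀ (l buf : List Char), (pvScanQuoted buf l).2.length ≤ l.length
  | [], buf => by simp [pvScanQuoted]
  | c :: rest, buf => by
    by_cases hb : c = '\\'
    · subst hb
      match rest with
      | [] => rw [pvScanQuoted_esc_nil]; simp
      | e :: rest' =>
        have := pvScanQuoted_length rest' (buf ++ [if e = 'n' then '\n' else if e = 't' then '\t'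
                 else if e = '\\' then '\\' else if e = '"' then '"' else e])
        rw [pvScanQuoted_esc]
        simp only [List.length_cons]
        omega
    · by_cases hq : c = '"'
      · subst hq; rw [pvScanQuoted_close]; simp
      · have := pvScanQuoted_length rest (buf ++ [c])
        rw [pvScanQuoted_other buf c rest hb hq]
        simp only [List.length_cons]
        omega

theorem pvScanWord_length : ∀ (l buf : List Char), (pvScanWord buf l).2.length ≤ l.length
  | [], buf => by simp [pvScanWord]
  | c :: rest, buf => by
    by_cases hs : pvIsSpecial c
    · simp [pvScanWord, hs]
    · have := pvScanWord_length rest (buf ++ [c])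
      simp only [pvScanWord, hs, Bool.false_eq_true, if_false, List.length_cons]
      omega

-- A's main `while i < length` loop, recursing on the remaining suffix of the text
def vdfLoopA (l : List Char) (tokens : List String) : List String :=
  match l with
  | [] => tokens
  | ch :: rest =>
    if pvIsWS ch then vdfLoopA rest tokens
    else if ch = '/' ∧ rest.head? = some '/' then
      vdfLoopA (pvSkipComment rest.tail) tokens
    else if ch = '{' || ch = '}' then
      vdfLoopA rest (tokens ++ [String.mk [ch]])
    else if ch = '"' then
      vdfLoopA (pvScanQuoted [] rest).2 (tokens ++ [String.mk (pvScanQuoted [] rest).1])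
    else
      if (pvScanWord [] (ch :: rest)).1 ≠ [] then
        vdfLoopA (pvScanWord [] (ch :: rest)).2 (tokens ++ [String.mk (pvScanWord [] (ch :: rest)).1])
      else vdfLoopA rest tokens
termination_by l.length
decreasing_by
  · simp
  · have h1 := pvSkipComment_length rest.tail
    have h2 : rest.tail.length ≤ rest.length := by cases rest <;> simp
    simp only [List.length_cons]; omega
  · simp
  · have := pvScanQuoted_length rest []
    simp only [List.length_cons]; omega
  · have h2 : pvIsSpecial ch = false := by
      simp only [pvIsSpecial, Bool.or_eq_true, decide_eq_true_eq, Bool.or_eq_false_iff,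
        decide_eq_false_iff_not]
      refine ⟨⟨⟨by simp_all, by simp_all⟩, by simp_all⟩, by simp_all⟩
    have h3 : pvScanWord [] (ch :: rest) = pvScanWord [ch] rest := by
      simp [pvScanWord, h2]
    rw [h3]
    have := pvScanWord_length rest [ch]
    simp only [List.length_cons]; omega
  · simp

def vdf_tokenize_py (text : String) : List String := vdfLoopA text.toList []

-- ===== PORT B =====
inductive PvState where
  | normal | slash | comment
  | quote : List Char → PvState
  | escape : List Char → PvState
  | word : List Char → PvState

def pvStep : List String × PvState → Char → List String × PvState
  | (toks, .normal), c =>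
    if pvIsWS c then (toks, .normal)
    else if c = '/' then (toks, .slash)
    else if c = '{' || c = '}' then (toks ++ [String.mk [c]], .normal)
    else if c = '"' then (toks, .quote [])
    else (toks, .word [c])
  | (toks, .slash), c =>
    if c = '/' then (toks, .comment)
    else if pvIsWS c then (toks ++ [String.mk ['/']], .normal)
    else if c = '{' || c = '}' then (toks ++ [String.mk ['/'], String.mk [c]], .normal)
    else if c = '"' then (toks ++ [String.mk ['/']], .quote [])
    else (toks, .word ['/', c])
  | (toks, .comment), c => if c = '\n' then (toks, .normal) else (toks, .comment)
  | (toks, .quote buf), c =>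
    if c = '\\' then (toks, .escape buf)
    else if c = '"' then (toks ++ [String.mk buf], .normal)
    else (toks, .quote (buf ++ [c]))
  | (toks, .escape buf), c =>
    (toks, .quote (buf ++ [if c = 'n' then '\n' else if c = 't' then '\t' else c]))
  | (toks, .word buf), c =>
    if pvIsWS c then (toks ++ [String.mk buf], .normal)
    else if c = '"' then (toks ++ [String.mk buf], .quote [])
    else if c = '{' || c = '}' then (toks ++ [String.mk buf, String.mk [c]], .normal)
    else (toks, .word (buf ++ [c]))

def pvFinish : List String × PvState → List String
  | (toks, .normal) => toks
  | (toks, .slash) => toks ++ [String.mk ['/']]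
  | (toks, .comment) => toks
  | (toks, .quote buf) => toks ++ [String.mk buf]
  | (toks, .escape buf) => toks ++ [String.mk buf]
  | (toks, .word buf) => toks ++ [String.mk buf]

def vdf_tokenize_py_alt (text : String) : List String :=
  pvFinish (text.toList.foldl pvStep ([], PvState.normal))

-- ===== PRECONDITION & SPEC =====
def Spec_vdf_tokenize_py (text : String) (out : List String) : Prop := out = vdf_tokenize_py_alt text
instance (text : String) (out : List String) : Decidable (Spec_vdf_tokenize_py text out) := by unfold Spec_vdf_tokenize_py; infer_instance

-- ===== CLAIM (what is proved, stated in full; the proofs are below) =====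
def Claim_equal_vdf_tokenize_py : Prop := ∀ (text : String), Dom_vdf_tokenize_py text → Spec_vdf_tokenize_py text (vdf_tokenize_py text)

-- ===== LEMMAS AND PROOFS =====

theorem pvNotSpecial (c : Char) (hs : ¬ pvIsSpecial c = true) :
    pvIsWS c = false ∧ c ≠ '"' ∧ c ≠ '{' ∧ c ≠ '}' := by
  simp only [pvIsSpecial, Bool.or_eq_true, decide_eq_true_eq, not_or, Bool.not_eq_true] at hs
  exact ⟨hs.1.1.1, hs.1.1.2, hs.1.2, hs.2⟩

theorem pvComment_run : ∀ (l : List Char) (toks : List String),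
    l.foldl pvStep (toks, PvState.comment) = (pvSkipComment l).foldl pvStep (toks, PvState.comment) := by
  intro l
  induction l with
  | nil => intro toks; simp [pvSkipComment]
  | cons c r ih =>
    intro toks
    by_cases hc : c = '\n'
    · simp [pvSkipComment, hc]
    · simp only [pvSkipComment, if_neg hc, List.foldl_cons, pvStep]
      exact ih toks

theorem pvSkipComment_shape : ∀ l : List Char,
    pvSkipComment l = [] ∨ ∃ r, pvSkipComment l = '\n' :: r ∧ r.length ≤ l.length := by
  intro l
  induction l with
  | nil => left; rfl
  | cons c r ih =>
    by_cases hc : c = '\n'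
    · right; exact ⟨r, by simp [pvSkipComment, hc], by simp⟩
    · rcases ih with h | ⟨r', h1, h2⟩
      · left; simp [pvSkipComment, hc, h]
      · right
        refine ⟨r', by simp [pvSkipComment, hc, h1], ?_⟩
        simp only [List.length_cons]; omega

theorem pvEsc_eq (e : Char) :
    (if e = 'n' then '\n' else if e = 't' then '\t'
     else if e = '\\' then '\\' else if e = '"' then '"' else e)
    = (if e = 'n' then '\n' else if e = 't' then '\t' else e) := by
  by_cases h1 : e = 'n'
  · simp [h1]
  · by_cases h2 : e = 't'
    · simp [h1, h2]
    · by_cases h3 : e = '\\'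
      · simp [h1, h2, h3]
      · by_cases h4 : e = '"'
        · simp [h1, h2, h3, h4]
        · simp [h1, h2, h3, h4]

theorem pvQuote_run : ∀ (l buf : List Char) (toks : List String),
    pvFinish (l.foldl pvStep (toks, PvState.quote buf))
      = pvFinish ((pvScanQuoted buf l).2.foldl pvStep
          (toks ++ [String.mk (pvScanQuoted buf l).1], PvState.normal))
  | [], buf, toks => by simp [pvScanQuoted, pvFinish]
  | c :: r, buf, toks => by
    by_cases hb : c = '\\'
    · subst hb
      match r with
      | [] => rw [pvScanQuoted_esc_nil]; simp [pvStep, pvFinish]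
      | e :: r' =>
        have hA := pvScanQuoted_esc buf e r'
        have hB : ('\\' :: e :: r').foldl pvStep (toks, PvState.quote buf)
            = r'.foldl pvStep (toks, PvState.quote
                (buf ++ [if e = 'n' then '\n' else if e = 't' then '\t' else e])) := by
          simp [pvStep]
        rw [hB, hA, pvEsc_eq]
        exact pvQuote_run r' _ toks
    · by_cases hq : c = '"'
      · subst hq
        rw [pvScanQuoted_close]
        simp [pvStep]
      · have hA := pvScanQuoted_other buf c r hb hq
        have hB : (c :: r).foldl pvStep (toks, PvState.quote buf)
            = r.foldl pvStep (toks, PvState.quote (buf ++ [c])) := by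
          simp only [List.foldl_cons, pvStep]
          rw [if_neg hb, if_neg hq]
        rw [hB, hA]
        exact pvQuote_run r (buf ++ [c]) toks

theorem pvWord_run : ∀ (l buf : List Char) (toks : List String),
    pvFinish (l.foldl pvStep (toks, PvState.word buf))
      = pvFinish ((pvScanWord buf l).2.foldl pvStep
          (toks ++ [String.mk (pvScanWord buf l).1], PvState.normal))
  | [], buf, toks => by simp [pvScanWord, pvFinish]
  | c :: r, buf, toks => by
    by_cases hs : pvIsSpecial c
    · have hsw : pvScanWord buf (c :: r) = (buf, c :: r) := by simp [pvScanWord, hs]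
      rw [hsw]
      rcases Bool.or_eq_true_iff.mp hs with h | h
      · rcases Bool.or_eq_true_iff.mp h with h | h
        · rcases Bool.or_eq_true_iff.mp h with h | h
          · -- whitespace
            have hw : pvIsWS c = true := h
            simp [pvStep, hw]
          · -- '"'
            simp only [decide_eq_true_eq] at h; subst h
            simp [pvStep, pvIsWS]
        · simp only [decide_eq_true_eq] at h; subst h
          simp [pvStep, pvIsWS]
      · simp only [decide_eq_true_eq] at h; subst h
        simp [pvStep, pvIsWS]
    · obtain ⟨hw, hq, h1, h2⟩ := pvNotSpecial c hs
      have hsw : pvScanWord buf (c :: r) = pvScanWord (buf ++ [c]) r := by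
        simp [pvScanWord, hs]
      have hstep : pvStep (toks, PvState.word buf) c = (toks, PvState.word (buf ++ [c])) := by
        simp [pvStep, hw, hq, h1, h2]
      rw [hsw, List.foldl_cons, hstep]
      exact pvWord_run r (buf ++ [c]) toks

theorem pvSlash_run : ∀ (l : List Char) (toks : List String), l.head? ≠ some '/' →
    pvFinish (l.foldl pvStep (toks, PvState.slash))
      = pvFinish ((pvScanWord ['/'] l).2.foldl pvStep
          (toks ++ [String.mk (pvScanWord ['/'] l).1], PvState.normal))
  | [], toks, _ => by simp [pvScanWord, pvFinish]
  | c :: r, toks, h => by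
    have hc : c ≠ '/' := by simpa using h
    by_cases hs : pvIsSpecial c
    · have hsw : pvScanWord ['/'] (c :: r) = (['/'], c :: r) := by simp [pvScanWord, hs]
      rw [hsw]
      rcases Bool.or_eq_true_iff.mp hs with h' | h'
      · rcases Bool.or_eq_true_iff.mp h' with h' | h'
        · rcases Bool.or_eq_true_iff.mp h' with h' | h'
          · have hw : pvIsWS c = true := h'
            simp [pvStep, hw, hc]
          · simp only [decide_eq_true_eq] at h'; subst h'
            simp [pvStep, pvIsWS]
        · simp only [decide_eq_true_eq] at h'; subst h'
          simp [pvStep, pvIsWS]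
      · simp only [decide_eq_true_eq] at h'; subst h'
        simp [pvStep, pvIsWS]
    · obtain ⟨hw, hq, h1, h2⟩ := pvNotSpecial c hs
      have hsw : pvScanWord ['/'] (c :: r) = pvScanWord ['/', c] r := by
        simp [pvScanWord, hs]
      have hstep : pvStep (toks, PvState.slash) c = (toks, PvState.word ['/', c]) := by
        simp [pvStep, hc, hw, hq, h1, h2]
      rw [hsw, List.foldl_cons, hstep]
      exact pvWord_run r ['/', c] toks

theorem pvScanWord_prefix : ∀ (l buf : List Char), ∃ t, (pvScanWord buf l).1 = buf ++ t
  | [], buf => ⟨[], by simp [pvScanWord]⟩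
  | c :: r, buf => by
    by_cases hs : pvIsSpecial c
    · exact ⟨[], by simp [pvScanWord, hs]⟩
    · obtain ⟨t, ht⟩ := pvScanWord_prefix r (buf ++ [c])
      refine ⟨c :: t, ?_⟩
      simp [pvScanWord, hs, ht]

theorem pvMain : ∀ (l : List Char) (toks : List String),
    pvFinish (l.foldl pvStep (toks, PvState.normal)) = vdfLoopA l toks
  | [], toks => by simp [vdfLoopA, pvFinish]
  | ch :: rest, toks => by
    by_cases hws : pvIsWS ch
    · have hstep : pvStep (toks, PvState.normal) ch = (toks, PvState.normal) := by
        simp [pvStep, hws]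
      rw [vdfLoopA, if_pos hws, List.foldl_cons, hstep]
      exact pvMain rest toks
    · by_cases hcm : ch = '/' ∧ rest.head? = some '/'
      · obtain ⟨hc1, hc2⟩ := hcm
        subst hc1
        match rest, hc2 with
        | c2 :: r2, hc2 =>
          have hc2' : c2 = '/' := by simpa using hc2
          subst hc2'
          rw [vdfLoopA, if_neg hws, if_pos ⟨rfl, hc2⟩]
          have hstep1 : pvStep (toks, PvState.normal) '/' = (toks, PvState.slash) := by
            simp [pvStep, hws]
          have hstep2 : pvStep (toks, PvState.slash) '/' = (toks, PvState.comment) := by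
            simp [pvStep]
          rw [List.foldl_cons, hstep1, List.foldl_cons, hstep2, pvComment_run]
          rcases pvSkipComment_shape r2 with h | ⟨r3, h3, h4⟩
          · rw [h]
            simp [pvFinish, vdfLoopA, List.tail_cons, h]
          · simp only [List.tail_cons, h3, List.foldl_cons]
            have hstep3 : pvStep (toks, PvState.comment) '\n' = (toks, PvState.normal) := by
              simp [pvStep]
            rw [hstep3, pvMain r3 toks, vdfLoopA]
            simp [pvIsWS]
      · by_cases hbr : ch = '{' || ch = '}'
        · have hcs : ch ≠ '/' := by
            rcases Bool.or_eq_true_iff.mp hbr with h | h <;>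
              · simp only [decide_eq_true_eq] at h; subst h; decide
          have hstep : pvStep (toks, PvState.normal) ch
              = (toks ++ [String.mk [ch]], PvState.normal) := by
            simp [pvStep, hws, hcs, hbr]
          rw [vdfLoopA, if_neg hws, if_neg hcm, if_pos hbr, List.foldl_cons, hstep]
          exact pvMain rest (toks ++ [String.mk [ch]])
        · by_cases hqo : ch = '"'
          · subst hqo
            have hstep : pvStep (toks, PvState.normal) '"' = (toks, PvState.quote []) := by
              simp [pvStep, pvIsWS]
            rw [vdfLoopA, if_neg hws, if_neg hcm, if_neg (by simpa using hbr), if_pos rfl,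
              List.foldl_cons, hstep, pvQuote_run]
            exact pvMain (pvScanQuoted [] rest).2 (toks ++ [String.mk (pvScanQuoted [] rest).1])
          · -- unquoted word branch; ch may be '/'
            have hbr' : ¬(ch = '{' ∨ ch = '}') := by simpa using hbr
            have hns : ¬ pvIsSpecial ch = true := by
              simp only [pvIsSpecial, Bool.or_eq_true, decide_eq_true_eq, not_or]
              exact ⟨⟨⟨hws, hqo⟩, fun h => hbr' (Or.inl h)⟩, fun h => hbr' (Or.inr h)⟩
            have hsw : pvScanWord [] (ch :: rest) = pvScanWord [ch] rest := by
              simp [pvScanWord, hns]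
            have hne : (pvScanWord [] (ch :: rest)).1 ≠ [] := by
              rw [hsw]
              obtain ⟨t, ht⟩ := pvScanWord_prefix rest [ch]
              simp [ht]
            rw [vdfLoopA, if_neg hws, if_neg hcm, if_neg (by simpa using hbr), if_neg hqo,
              if_pos hne, hsw]
            by_cases hsl : ch = '/'
            · subst hsl
              have hstep : pvStep (toks, PvState.normal) '/' = (toks, PvState.slash) := by
                simp [pvStep, hws]
              have hh : rest.head? ≠ some '/' := fun hcon => hcm ⟨rfl, hcon⟩
              rw [List.foldl_cons, hstep, pvSlash_run rest toks hh]
              exact pvMain (pvScanWord ['/'] rest).2 (toks ++ [String.mk (pvScanWord ['/'] rest).1])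
            · obtain ⟨hw', hq', h1', h2'⟩ := pvNotSpecial ch hns
              have hstep : pvStep (toks, PvState.normal) ch = (toks, PvState.word [ch]) := by
                simp [pvStep, hw', hsl, hq', h1', h2']
              rw [List.foldl_cons, hstep, pvWord_run]
              exact pvMain (pvScanWord [ch] rest).2 (toks ++ [String.mk (pvScanWord [ch] rest).1])
termination_by l toks => l.length
decreasing_by
  · simp only [List.length_cons]; omega
  · simp only [List.length_cons]
    have := pvSkipComment_length r2
    omega
  · simp only [List.length_cons]; omega
  · have := pvScanQuoted_length rest ([] : List Char)
    simp only [List.length_cons]; omega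
  · have := pvScanWord_length rest ['/']
    simp only [List.length_cons]; omega
  · have := pvScanWord_length rest [ch]
    simp only [List.length_cons]; omega

-- ===== VERDICT (by name: the statement is the Claim_ definition above) =====
theorem vdf_tokenize_py_spec : Claim_equal_vdf_tokenize_py := by
  intro text _
  unfold Spec_vdf_tokenize_py vdf_tokenize_py vdf_tokenize_py_alt
  exact (pvMain text.toList []).symm
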